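-- pv_equiv track=rewrite | github.com/karillisa/ITMO | Semester-4/Алгоритмы и структура данных/Codeforses/Блок 4/B4.py | solve
-- ===== SOURCE A (Python) =====
-- from collections import deque
--
-- def solve(grid, n, m):
--     max_volume = 0
--     seen = set()
--
--     def bfs(i, j):
--         queue = deque([(i, j)])
--         volume = 0
--         while queue:
--             x, y = queue.popleft()
--             if (x, y) in seen:
--                 continue
--             seen.add((x, y))
--             volume += grid[x][y]
--             for dx, dy in [(0, 1), (1, 0), (0, -1), (-1, 0)]:
--                 nx, ny = x + dx, y + dy
--                 if 0 <= nx < n and 0 <= ny < m and grid[nx][ny] != 0 and (nx, ny) not in seen: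
--                     queue.append((nx, ny))
--         return volume
--
--     for i in range(n):
--         for j in range(m):
--             if (i, j) not in seen and grid[i][j] != 0:
--                 max_volume = max(max_volume, bfs(i, j))
--
--     return max_volume
-- ===== SOURCE B (Python) =====
-- def solve(grid, n, m):
--     # Connected-component labeling with merge-by-relabel (small class into large):
--     # no BFS/DFS worklist; one row-major pass unioning each nonzero cell with its
--     # up and left neighbours, then a max over per-component sums.
--     comp = {}     # cell -> representative cell of its component
--     members = {}  # representative -> list of cells in its component
--     sums = {}     # representative -> component sum
--     for i in range(n):
--         for j in range(m):
--             if grid[i][j] != 0: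
--                 comp[(i, j)] = (i, j)
--                 members[(i, j)] = [(i, j)]
--                 sums[(i, j)] = grid[i][j]
--                 for p in ((i - 1, j), (i, j - 1)):
--                     if p in comp:
--                         r1, r2 = comp[(i, j)], comp[p]
--                         if r1 != r2:
--                             if len(members[r1]) > len(members[r2]):
--                                 r1, r2 = r2, r1
--                             for q in members[r1]:
--                                 comp[q] = r2
--                             members[r2] = members[r2] + members[r1]
--                             sums[r2] = sums[r2] + sums[r1]
--                             del members[r1]
--                             del sums[r1]
--     best = 0
--     for v in sums.values():
--         if v > best:
--             best = v
--     return best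
-- ===== Notes on version B (the rewrite author's own statement) =====
-- stated objective: alternative
-- what changed: A explores each component with a BFS flood fill (deque + visited set) restarted from every unvisited nonzero cell; B never traverses: it does one row-major pass that union-merges each nonzero cell with its up and left neighbours in a component-labeling structure (cell->representative map with per-representative member lists and sums, merging the smaller class into the larger), then takes the max over the per-component sums.
import Mathlib
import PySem

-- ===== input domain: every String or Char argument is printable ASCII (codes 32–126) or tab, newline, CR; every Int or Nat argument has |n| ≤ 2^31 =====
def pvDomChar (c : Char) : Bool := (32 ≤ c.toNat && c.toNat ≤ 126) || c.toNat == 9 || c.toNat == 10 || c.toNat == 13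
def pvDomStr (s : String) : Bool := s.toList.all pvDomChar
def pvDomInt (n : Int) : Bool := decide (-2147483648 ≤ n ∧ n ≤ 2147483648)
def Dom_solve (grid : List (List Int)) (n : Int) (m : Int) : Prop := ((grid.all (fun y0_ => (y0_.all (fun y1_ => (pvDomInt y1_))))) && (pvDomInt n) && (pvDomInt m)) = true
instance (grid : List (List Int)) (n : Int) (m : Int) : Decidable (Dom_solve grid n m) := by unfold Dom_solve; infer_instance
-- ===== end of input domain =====

-- B replaces A's BFS flood fill (deque + visited set, restarted from every unvisited
-- nonzero cell) by a traversal-free connected-component labeling: one row-major pass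
-- that union-merges each nonzero cell with its up/left neighbours (cell→representative
-- map, per-representative member lists and sums, smaller class relabelled into larger),
-- then a max over the per-component sums; equivalence is proved through the
-- grid-connectivity characterisation of both results.

-- ===== shared port-side helpers =====

-- Python's grid[x][y]; on inputs admitted by Pre_solve every access made by either
-- program is in range, so the `getD 0` default is never the value actually used.
def gAt (grid : List (List Int)) (x y : Int) : Int :=
  ((PySem.List.pyGet? grid x).bind (fun r => PySem.List.pyGet? r y)).getD 0

-- the in-bounds-and-nonzero test A writes inline
def okb (grid : List (List Int)) (n m : Int) (c : Int × Int) : Bool :=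
  decide (0 ≤ c.1) && decide (c.1 < n) && decide (0 ≤ c.2) && decide (c.2 < m) &&
    decide (gAt grid c.1 c.2 ≠ 0)

def allCells (n m : Int) : List (Int × Int) :=
  (PySem.List.pyRange 0 n 1).flatMap (fun i => (PySem.List.pyRange 0 m 1).map (fun j => (i, j)))

-- termination measure for A's BFS: number of in-range nonzero cells not yet seen
def unseenCount (grid : List (List Int)) (n m : Int) (seen : PySem.Set (Int × Int)) : Nat :=
  ((allCells n m).filter (fun c => okb grid n m c && !PySem.Set.contains seen c)).length

lemma filter_length_lt {α : Type} {p q : α → Bool} (l : List α)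
    (hpq : ∀ x, p x = true → q x = true) {x : α} (hx : x ∈ l)
    (hq : q x = true) (hp : p x = false) :
    (l.filter p).length < (l.filter q).length := by
  induction l with
  | nil => cases hx
  | cons a l ih =>
    have hle : (l.filter p).length ≤ (l.filter q).length := by
      rw [← List.countP_eq_length_filter, ← List.countP_eq_length_filter]
      exact List.countP_mono_left (fun y _ h => hpq y h)
    rcases List.mem_cons.mp hx with rfl | hx'
    · rw [List.filter_cons_of_neg (by simp [hp]), List.filter_cons_of_pos hq]
      exact Nat.lt_succ_of_le hle
    · have hlt := ih hx'
      by_cases hpa : p a = true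
      · simp only [List.filter_cons, hpa, hpq a hpa, if_true, List.length_cons]
        omega
      · simp only [Bool.not_eq_true] at hpa
        simp only [List.filter_cons, hpa, Bool.false_eq_true, if_false]
        by_cases hqa : q a = true
        · simp only [hqa, if_true, List.length_cons]; omega
        · simp only [Bool.not_eq_true] at hqa
          simp only [hqa, Bool.false_eq_true, if_false]; exact hlt

lemma mem_allCells {n m : Int} {c : Int × Int} :
    c ∈ allCells n m ↔ (0 ≤ c.1 ∧ c.1 < n) ∧ (0 ≤ c.2 ∧ c.2 < m) := by
  rcases c with ⟨x, y⟩
  simp [allCells, List.mem_flatMap, PySem.List.mem_pyRange_one]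

lemma okb_mem_allCells {grid : List (List Int)} {n m : Int} {c : Int × Int}
    (h : okb grid n m c = true) : c ∈ allCells n m := by
  simp only [okb, Bool.and_eq_true, decide_eq_true_eq] at h
  exact mem_allCells.mpr ⟨⟨h.1.1.1.1, h.1.1.1.2⟩, ⟨h.1.1.2, h.1.2⟩⟩

lemma contains_add_of_ne {s : PySem.Set (Int × Int)} {c x : Int × Int} (h : x ≠ c) :
    PySem.Set.contains (PySem.Set.add s c) x = PySem.Set.contains s x := by
  apply Bool.eq_iff_iff.mpr
  simp only [PySem.Set.contains_iff, PySem.Set.mem_add]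
  exact ⟨fun h' => h'.elim id (fun e => absurd e h), Or.inl⟩

lemma unseen_add_lt {grid : List (List Int)} {n m : Int} {seen : PySem.Set (Int × Int)}
    {c : Int × Int} (hok : okb grid n m c = true)
    (hc : PySem.Set.contains seen c = false) :
    unseenCount grid n m (PySem.Set.add seen c) < unseenCount grid n m seen := by
  have hcm : c ∉ seen := fun h => by
    rw [(PySem.Set.contains_iff seen c).mpr h] at hc; cases hc
  refine filter_length_lt (allCells n m) ?_ (okb_mem_allCells hok) ?_ ?_
  · intro x hx
    simp only [Bool.and_eq_true, Bool.not_eq_true'] at hx ⊢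
    refine ⟨hx.1, ?_⟩
    by_cases hxc : x = c
    · subst hxc; exact hc
    · rw [← contains_add_of_ne hxc]; exact hx.2
  · simp [hok, hcm]
  · simp [PySem.Set.mem_add]

lemma unseen_add_eq {grid : List (List Int)} {n m : Int} {seen : PySem.Set (Int × Int)}
    {c : Int × Int} (hok : okb grid n m c = false) :
    unseenCount grid n m (PySem.Set.add seen c) = unseenCount grid n m seen := by
  unfold unseenCount
  congr 1
  apply List.filter_congr
  intro x _
  by_cases hxc : x = c
  · subst hxc; simp [hok]
  · rw [contains_add_of_ne hxc]

-- ===== PORT A =====  (BFS with a deque, marking cells when popped, per-cell skip branch)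

def dirsA : List (Int × Int) := [(0, 1), (1, 0), (0, -1), (-1, 0)]

def bfsLoop (grid : List (List Int)) (n m : Int) :
    List (Int × Int) → PySem.Set (Int × Int) → Int → Int × PySem.Set (Int × Int)
  | [], seen, vol => (vol, seen)
  | c :: rest, seen, vol =>
    if PySem.Set.contains seen c then
      bfsLoop grid n m rest seen vol
    else
      bfsLoop grid n m
        (dirsA.foldl
          (fun q d =>
            if okb grid n m (c.1 + d.1, c.2 + d.2) &&
                !PySem.Set.contains (PySem.Set.add seen c) (c.1 + d.1, c.2 + d.2) then
              q ++ [(c.1 + d.1, c.2 + d.2)]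
            else q)
          rest)
        (PySem.Set.add seen c) (vol + gAt grid c.1 c.2)
  termination_by queue seen _ =>
    (unseenCount grid n m seen, (queue.filter (fun c => !okb grid n m c)).length, queue.length)
  decreasing_by
  · -- popped an already-seen cell
    by_cases hok : okb grid n m c = true
    · apply Prod.Lex.right
      apply Prod.Lex.right'
      · simp [hok]
      · simp
    · apply Prod.Lex.right
      apply Prod.Lex.left
      simp only [Bool.not_eq_true] at hok
      simp [hok]
  · -- popped a fresh cell
    rename_i hseen
    simp only [Bool.not_eq_true] at hseen
    by_cases hok : okb grid n m c = true
    · exact Prod.Lex.left _ _ (unseen_add_lt hok hseen)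
    · simp only [Bool.not_eq_true] at hok
      rw [unseen_add_eq hok]
      apply Prod.Lex.right
      apply Prod.Lex.left
      simp only [dite_eq_ite, PySem.List.foldl_append_if]
      rw [List.filter_append]
      have hnil :
          (((dirsA.filter fun d => okb grid n m (c.1 + d.1, c.2 + d.2) &&
              !PySem.Set.contains (PySem.Set.add seen c) (c.1 + d.1, c.2 + d.2))).map
            (fun d => (c.1 + d.1, c.2 + d.2))).filter (fun c => !okb grid n m c) = [] := by
        apply List.filter_eq_nil_iff.mpr
        intro x hx
        simp only [List.mem_map, List.mem_filter, Bool.and_eq_true] at hx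
        obtain ⟨d, ⟨_, hd⟩, rfl⟩ := hx
        simp [hd.1]
      rw [hnil, List.append_nil]
      simp [hok]

def solve (grid : List (List Int)) (n : Int) (m : Int) : Int :=
  ((PySem.List.pyRange 0 n 1).foldl
    (fun (st : Int × PySem.Set (Int × Int)) i =>
      (PySem.List.pyRange 0 m 1).foldl
        (fun st j =>
          if ¬ PySem.Set.contains st.2 (i, j) ∧ gAt grid i j ≠ 0 then
            let r := bfsLoop grid n m [(i, j)] st.2 0
            (max st.1 r.1, r.2)
          else st)
        st)
    ((0 : Int), PySem.Set.empty)).1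

-- ===== PORT B =====  (row-major union-merge component labeling, no traversal)

-- state: (cell → representative, representative → member list, representative → sum)
def BState : Type :=
  PySem.Dict (Int × Int) (Int × Int) × PySem.Dict (Int × Int) (List (Int × Int)) ×
    PySem.Dict (Int × Int) Int

-- body of "for p in ((i-1,j),(i,j-1)): …" with c = (i, j)
def mergeAt (c : Int × Int) (st : BState) (p : Int × Int) : BState :=
  if st.1.contains p then
    let r1 := st.1.getD c c
    let r2 := st.1.getD p p
    if r1 ≠ r2 then
      let rr := if (st.2.1.getD r1 []).length > (st.2.1.getD r2 []).length then (r2, r1)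
                else (r1, r2)
      let comp := (st.2.1.getD rr.1 []).foldl (fun d q => d.insert q rr.2) st.1
      let members := (st.2.1.insert rr.2 (st.2.1.getD rr.2 [] ++ st.2.1.getD rr.1 [])).erase rr.1
      let sums := (st.2.2.insert rr.2 (st.2.2.getD rr.2 0 + st.2.2.getD rr.1 0)).erase rr.1
      (comp, members, sums)
    else st
  else st

-- body of the cell loop: register (i, j) as a fresh singleton, then merge with up/left
def bCell (grid : List (List Int)) (st : BState) (i j : Int) : BState :=
  if gAt grid i j ≠ 0 then
    let comp := st.1.insert (i, j) (i, j)
    let members := st.2.1.insert (i, j) [(i, j)]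
    let sums := st.2.2.insert (i, j) (gAt grid i j)
    [(i - 1, j), (i, j - 1)].foldl (mergeAt (i, j)) (comp, members, sums)
  else st

def solve_alt (grid : List (List Int)) (n : Int) (m : Int) : Int :=
  let fin :=
    (PySem.List.pyRange 0 n 1).foldl
      (fun (st : BState) i =>
        (PySem.List.pyRange 0 m 1).foldl (fun st j => bCell grid st i j) st)
      (PySem.Dict.empty, PySem.Dict.empty, PySem.Dict.empty)
  fin.2.2.values.foldl (fun best v => if v > best then v else best) 0

-- ===== PRECONDITION & SPEC =====
-- Pre_solve excludes exactly the inputs where Python A raises an IndexError: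
-- whenever both loop ranges are nonempty, every cell (i, j) with i < n, j < m is read,
-- so the grid must have at least n rows and each of the first n rows at least m entries.
def Pre_solve (grid : List (List Int)) (n : Int) (m : Int) : Prop :=
  n ≤ 0 ∨ m ≤ 0 ∨ (n ≤ (grid.length : Int) ∧ ∀ r ∈ grid.take n.toNat, m ≤ (r.length : Int))
instance (grid : List (List Int)) (n : Int) (m : Int) : Decidable (Pre_solve grid n m) := by
  unfold Pre_solve; infer_instance

def pvWitness_solve : List (List Int) × Int × Int := ([[1, 2], [0, -3]], 2, 2)

def Spec_solve (grid : List (List Int)) (n : Int) (m : Int) (out : Int) : Prop := out = solve_alt grid n m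
instance (grid : List (List Int)) (n : Int) (m : Int) (out : Int) : Decidable (Spec_solve grid n m out) := by unfold Spec_solve; infer_instance

-- ===== CLAIM (what is proved, stated in full; the proofs are below) =====
def Claim_equal_solve : Prop := ∀ (grid : List (List Int)) (n : Int) (m : Int), Dom_solve grid n m → Pre_solve grid n m → Spec_solve grid n m (solve grid n m)

-- ===== LEMMAS AND PROOFS =====

-- the four grid neighbours of a cell
def nbrs (c : Int × Int) : List (Int × Int) :=
  [(c.1 + 1, c.2), (c.1 - 1, c.2), (c.1, c.2 + 1), (c.1, c.2 - 1)]

-- the two already-processed neighbours B looks at (up and left)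
def prevNbrs (c : Int × Int) : List (Int × Int) :=
  [(c.1 - 1, c.2), (c.1, c.2 - 1)]

-- connectivity among the cells satisfying K (K will always imply okb)
def Conn (K : Int × Int → Prop) : Int × Int → Int × Int → Prop :=
  Relation.ReflTransGen (fun x y => y ∈ nbrs x ∧ K x ∧ K y)

def KA (grid : List (List Int)) (n m : Int) : Int × Int → Prop :=
  fun x => okb grid n m x = true

noncomputable def compSum (grid : List (List Int)) (n m : Int) (P : Int × Int → Prop) : Int :=
  (@Finset.filter _ P (fun _ => Classical.propDecidable _) (allCells n m).toFinset).sum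
    (fun c => gAt grid c.1 c.2)

-- the component sum of the component of c
noncomputable def cval (grid : List (List Int)) (n m : Int) (c : Int × Int) : Int :=
  compSum grid n m (Conn (KA grid n m) c)

-- ===== A-side: BFS characterisation (reachability with a blocked set) =====

def StepR (grid : List (List Int)) (n m : Int) (S : Int × Int → Prop) (c d : Int × Int) : Prop :=
  d ∈ nbrs c ∧ okb grid n m d = true ∧ ¬ S d

def ReachR (grid : List (List Int)) (n m : Int) (S : Int × Int → Prop) :
    Int × Int → Int × Int → Prop :=
  Relation.ReflTransGen (StepR grid n m S)

-- cells A's BFS will newly visit from queue Q with blocked set S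
def NWP (grid : List (List Int)) (n m : Int) (S : Int × Int → Prop)
    (Q : List (Int × Int)) (x : Int × Int) : Prop :=
  ∃ q ∈ Q, ¬ S q ∧ ReachR grid n m S q x

lemma reach_anti {grid : List (List Int)} {n m : Int} {S S' : Int × Int → Prop}
    (h : ∀ y, S y → S' y) {q x : Int × Int} (hr : ReachR grid n m S' q x) :
    ReachR grid n m S q x :=
  Relation.ReflTransGen.mono (fun _ _ hs => ⟨hs.1, hs.2.1, fun hy => hs.2.2 (h _ hy)⟩) hr

lemma reach_congr {grid : List (List Int)} {n m : Int} {S S' : Int × Int → Prop}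
    (h : ∀ y, S y ↔ S' y) {q x : Int × Int} :
    ReachR grid n m S q x ↔ ReachR grid n m S' q x :=
  ⟨reach_anti (fun y hy => (h y).mpr hy), reach_anti (fun y hy => (h y).mp hy)⟩

lemma block_or_start {grid : List (List Int)} {n m : Int} {S Δ : Int × Int → Prop}
    {q x : Int × Int} (h : ReachR grid n m S q x) :
    ReachR grid n m (fun y => S y ∨ Δ y) q x ∨
      ∃ d, Δ d ∧ ReachR grid n m (fun y => S y ∨ Δ y) d x := by
  induction h with
  | refl => exact Or.inl Relation.ReflTransGen.refl
  | @tail y z _ hstep ih =>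
    by_cases hz : Δ z
    · exact Or.inr ⟨z, hz, Relation.ReflTransGen.refl⟩
    · have hstep' : StepR grid n m (fun y => S y ∨ Δ y) y z :=
        ⟨hstep.1, hstep.2.1, fun h' => h'.elim hstep.2.2 hz⟩
      rcases ih with h1 | ⟨d, hd, hp⟩
      · exact Or.inl (h1.tail hstep')
      · exact Or.inr ⟨d, hd, hp.tail hstep'⟩

lemma not_mem_nbrs_self (c : Int × Int) : c ∉ nbrs c := by
  simp [nbrs, Prod.ext_iff]
  omega

lemma nwp_not_blocked {grid : List (List Int)} {n m : Int} {S : Int × Int → Prop}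
    {Q : List (Int × Int)} {x : Int × Int} (h : NWP grid n m S Q x) : ¬ S x := by
  obtain ⟨q, _, hq, hr⟩ := h
  rcases (Relation.ReflTransGen.cases_tail hr) with rfl | ⟨y, _, hstep⟩
  · exact hq
  · exact hstep.2.2

lemma nwp_pop {grid : List (List Int)} {n m : Int} {S : Int × Int → Prop}
    {c : Int × Int} {rest Q' : List (Int × Int)} (hc : ¬ S c)
    (hQ' : ∀ d, d ∈ Q' ↔ d ∈ rest ∨ (d ∈ nbrs c ∧ okb grid n m d = true ∧ ¬ (S d ∨ d = c)))
    (x : Int × Int) :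
    NWP grid n m S (c :: rest) x ↔
      (x = c ∨ NWP grid n m (fun y => S y ∨ y = c) Q' x) := by
  have from_c : ∀ {x}, ReachR grid n m (fun y => S y ∨ y = c) c x →
      x = c ∨ NWP grid n m (fun y => S y ∨ y = c) Q' x := by
    intro x hr
    rcases Relation.ReflTransGen.cases_head hr with rfl | ⟨d, hstep, hrest⟩
    · exact Or.inl rfl
    · exact Or.inr ⟨d, (hQ' d).mpr (Or.inr ⟨hstep.1, hstep.2.1, hstep.2.2⟩), hstep.2.2, hrest⟩
  constructor
  · rintro ⟨q, hqQ, hnq, hr⟩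
    by_cases hqc : q = c
    · subst hqc
      rcases Relation.ReflTransGen.cases_head hr with rfl | ⟨d, hstep, hrest⟩
      · exact Or.inl rfl
      · have hdc : d ≠ q := fun h => (not_mem_nbrs_self q) (h ▸ hstep.1)
        rcases block_or_start (Δ := fun y => y = q) hrest with h1 | ⟨d', hd', hp⟩
        · exact Or.inr ⟨d, (hQ' d).mpr (Or.inr ⟨hstep.1, hstep.2.1,
            fun h => h.elim hstep.2.2 hdc⟩), fun h => h.elim hstep.2.2 hdc, h1⟩
        · exact from_c (hd' ▸ hp)
    · rcases List.mem_cons.mp hqQ with hqc' | hqr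
      · exact absurd hqc' hqc
      · rcases block_or_start (Δ := fun y => y = c) hr with h1 | ⟨d', hd', hp⟩
        · exact Or.inr ⟨q, (hQ' q).mpr (Or.inl hqr), fun h => h.elim hnq hqc, h1⟩
        · exact from_c (hd' ▸ hp)
  · rintro (rfl | ⟨q, hqQ', hnq, hr⟩)
    · exact ⟨x, List.mem_cons_self, hc, Relation.ReflTransGen.refl⟩
    · have hr' : ReachR grid n m S q x := reach_anti (fun y hy => Or.inl hy) hr
      rcases (hQ' q).mp hqQ' with hqr | ⟨hqn, hqok, hqns⟩
      · exact ⟨q, List.mem_cons_of_mem _ hqr, fun h => hnq (Or.inl h), hr'⟩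
      · refine ⟨c, List.mem_cons_self, hc, Relation.ReflTransGen.head ⟨hqn, hqok, ?_⟩ hr'⟩
        exact fun h => hqns (Or.inl h)

lemma compSum_congr {grid : List (List Int)} {n m : Int} {P P' : Int × Int → Prop}
    (h : ∀ x, P x ↔ P' x) : compSum grid n m P = compSum grid n m P' := by
  unfold compSum
  congr 1
  apply Finset.ext
  intro x
  simp only [Finset.mem_filter]
  rw [h x]

lemma compSum_empty {grid : List (List Int)} {n m : Int} {P : Int × Int → Prop}
    (h : ∀ x, ¬ P x) : compSum grid n m P = 0 := by
  unfold compSum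
  have : (@Finset.filter _ P (fun _ => Classical.propDecidable _) (allCells n m).toFinset)
      = (∅ : Finset (Int × Int)) := by
    apply Finset.ext
    intro x
    simp only [Finset.mem_filter, Finset.notMem_empty, iff_false]
    exact fun hx => h x hx.2
  rw [this, Finset.sum_empty]

lemma compSum_insert {grid : List (List Int)} {n m : Int} {P P' : Int × Int → Prop}
    {c : Int × Int} (hcm : c ∈ allCells n m) (hiff : ∀ x, P x ↔ (x = c ∨ P' x))
    (hnc : ¬ P' c) :
    compSum grid n m P = gAt grid c.1 c.2 + compSum grid n m P' := by
  unfold compSum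
  have hset : (@Finset.filter _ P (fun _ => Classical.propDecidable _) (allCells n m).toFinset)
      = insert c (@Finset.filter _ P' (fun _ => Classical.propDecidable _) (allCells n m).toFinset) := by
    apply Finset.ext
    intro x
    simp only [Finset.mem_filter, Finset.mem_insert, List.mem_toFinset]
    constructor
    · rintro ⟨hxm, hx⟩
      rcases (hiff x).mp hx with rfl | hx'
      · exact Or.inl rfl
      · exact Or.inr ⟨hxm, hx'⟩
    · rintro (rfl | ⟨hxm, hx'⟩)
      · exact ⟨hcm, (hiff x).mpr (Or.inl rfl)⟩
      · exact ⟨hxm, (hiff x).mpr (Or.inr hx')⟩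
  rw [hset, Finset.sum_insert (by simp only [Finset.mem_filter]; exact fun h => hnc h.2)]

lemma compSum_disjoint_union {grid : List (List Int)} {n m : Int} {P Q : Int × Int → Prop}
    (h : ∀ x, ¬ (P x ∧ Q x)) :
    compSum grid n m (fun x => P x ∨ Q x) = compSum grid n m P + compSum grid n m Q := by
  classical
  unfold compSum
  rw [← Finset.sum_union]
  · congr 1
    apply Finset.ext
    intro x
    simp only [Finset.mem_filter, Finset.mem_union]
    tauto
  · rw [Finset.disjoint_left]
    intro x hx hx'
    simp only [Finset.mem_filter] at hx hx'
    exact h x ⟨hx.2, hx'.2⟩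

lemma contains_false_iff {s : PySem.Set (Int × Int)} {x : Int × Int} :
    PySem.Set.contains s x = false ↔ x ∉ s := by
  rw [← Bool.not_eq_true, not_iff_not, PySem.Set.contains_iff]

lemma nwp_congr {grid : List (List Int)} {n m : Int} {S S' : Int × Int → Prop}
    (h : ∀ y, S y ↔ S' y) (Q : List (Int × Int)) (x : Int × Int) :
    NWP grid n m S Q x ↔ NWP grid n m S' Q x := by
  constructor <;> rintro ⟨q, hq, hnq, hr⟩
  · exact ⟨q, hq, fun hy => hnq ((h q).mpr hy), (reach_congr h).mp hr⟩
  · exact ⟨q, hq, fun hy => hnq ((h q).mp hy), (reach_congr h).mpr hr⟩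

lemma nwp_skip {grid : List (List Int)} {n m : Int} {S : Int × Int → Prop}
    {c : Int × Int} {rest : List (Int × Int)} (hc : S c) (x : Int × Int) :
    NWP grid n m S (c :: rest) x ↔ NWP grid n m S rest x := by
  constructor
  · rintro ⟨q, hq, hnq, hr⟩
    rcases List.mem_cons.mp hq with rfl | hq'
    · exact absurd hc hnq
    · exact ⟨q, hq', hnq, hr⟩
  · rintro ⟨q, hq, hnq, hr⟩
    exact ⟨q, List.mem_cons_of_mem _ hq, hnq, hr⟩

lemma dirsA_image_mem {c dd : Int × Int} (h : dd ∈ dirsA) :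
    (c.1 + dd.1, c.2 + dd.2) ∈ nbrs c := by
  simp only [dirsA, List.mem_cons, List.not_mem_nil, or_false] at h
  rcases h with rfl | rfl | rfl | rfl <;> simp [nbrs, sub_eq_add_neg]

lemma nbrs_image_dirsA {c x : Int × Int} (h : x ∈ nbrs c) :
    ∃ dd ∈ dirsA, x = (c.1 + dd.1, c.2 + dd.2) := by
  simp only [nbrs, List.mem_cons, List.not_mem_nil, or_false] at h
  rcases h with rfl | rfl | rfl | rfl
  · exact ⟨(1, 0), by simp [dirsA], by simp⟩
  · exact ⟨(-1, 0), by simp [dirsA], by simp [sub_eq_add_neg]⟩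
  · exact ⟨(0, 1), by simp [dirsA], by simp⟩
  · exact ⟨(0, -1), by simp [dirsA], by simp [sub_eq_add_neg]⟩

lemma bfsLoop_nil {grid : List (List Int)} {n m : Int} {seen : PySem.Set (Int × Int)} {vol : Int} :
    bfsLoop grid n m [] seen vol = (vol, seen) := by
  rw [bfsLoop.eq_def]

lemma bfsLoop_cons {grid : List (List Int)} {n m : Int} {c : Int × Int}
    {rest : List (Int × Int)} {seen : PySem.Set (Int × Int)} {vol : Int} :
    bfsLoop grid n m (c :: rest) seen vol =
      if PySem.Set.contains seen c = true then bfsLoop grid n m rest seen vol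
      else
        bfsLoop grid n m
          (List.foldl
            (fun q d =>
              if (okb grid n m (c.1 + d.1, c.2 + d.2) &&
                  !PySem.Set.contains (PySem.Set.add seen c) (c.1 + d.1, c.2 + d.2)) = true then
                q ++ [(c.1 + d.1, c.2 + d.2)]
              else q)
            rest dirsA)
          (PySem.Set.add seen c) (vol + gAt grid c.1 c.2) := by
  rw [bfsLoop.eq_def]

-- characterization of A's BFS loop
lemma bfs_char (grid : List (List Int)) (n m : Int) :
    ∀ (Q : List (Int × Int)) (seen : PySem.Set (Int × Int)) (vol : Int),
      (∀ c ∈ Q, okb grid n m c = true) →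
      (bfsLoop grid n m Q seen vol).1 =
          vol + compSum grid n m (NWP grid n m (· ∈ seen) Q) ∧
        ∀ x, x ∈ (bfsLoop grid n m Q seen vol).2 ↔
          x ∈ seen ∨ NWP grid n m (· ∈ seen) Q x := by
  intro Q seen vol
  induction Q, seen, vol using bfsLoop.induct grid n m with
  | case1 seen vol =>
    intro _
    rw [bfsLoop_nil]
    constructor
    · rw [compSum_empty (fun x ⟨q, hq, _⟩ => absurd hq (List.not_mem_nil))]
      simp
    · intro x
      simp only [NWP, List.not_mem_nil, false_and, exists_const, or_false]
  | case2 c rest seen vol hcont ih =>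
    intro hq
    obtain ⟨ih1, ih2⟩ := ih (fun d hd => hq d (List.mem_cons_of_mem _ hd))
    have hcS : c ∈ seen := (PySem.Set.contains_iff _ _).mp hcont
    rw [bfsLoop_cons, if_pos hcont]
    constructor
    · rw [ih1, compSum_congr (P := NWP grid n m (· ∈ seen) rest)
        (P' := NWP grid n m (· ∈ seen) (c :: rest)) (fun x => (nwp_skip hcS x).symm)]
    · intro x
      rw [ih2 x]
      exact or_congr Iff.rfl (nwp_skip hcS x).symm
  | case3 c rest seen vol hcont ih =>
    intro hq
    simp only [dite_eq_ite] at ih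
    have hcnot : c ∉ seen := fun h => hcont ((PySem.Set.contains_iff _ _).mpr h)
    have hfold := PySem.List.foldl_append_if
      (fun d : Int × Int => okb grid n m (c.1 + d.1, c.2 + d.2) &&
        !PySem.Set.contains (PySem.Set.add seen c) (c.1 + d.1, c.2 + d.2))
      (fun d : Int × Int => (c.1 + d.1, c.2 + d.2)) dirsA rest
    rw [hfold] at ih
    have hQmem : ∀ d, d ∈ rest ++
        ((dirsA.filter (fun d : Int × Int => okb grid n m (c.1 + d.1, c.2 + d.2) &&
          !PySem.Set.contains (PySem.Set.add seen c) (c.1 + d.1, c.2 + d.2))).map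
          (fun d : Int × Int => (c.1 + d.1, c.2 + d.2))) ↔
        d ∈ rest ∨ (d ∈ nbrs c ∧ okb grid n m d = true ∧ ¬ (d ∈ seen ∨ d = c)) := by
      intro d
      simp only [List.mem_append, List.mem_map, List.mem_filter]
      constructor
      · rintro (h | ⟨dd, ⟨hdd, hcond⟩, rfl⟩)
        · exact Or.inl h
        · simp only [Bool.and_eq_true, Bool.not_eq_true'] at hcond
          rw [contains_false_iff, PySem.Set.mem_add] at hcond
          exact Or.inr ⟨dirsA_image_mem hdd, hcond.1, hcond.2⟩
      · rintro (h | ⟨hnb, hok, hns⟩)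
        · exact Or.inl h
        · obtain ⟨dd, hdd, rfl⟩ := nbrs_image_dirsA hnb
          refine Or.inr ⟨dd, ⟨hdd, ?_⟩, rfl⟩
          simp only [Bool.and_eq_true, Bool.not_eq_true']
          exact ⟨hok, contains_false_iff.mpr
            (fun h => hns ((PySem.Set.mem_add seen c _).mp h))⟩
    have hq' : ∀ d ∈ rest ++
        ((dirsA.filter (fun d : Int × Int => okb grid n m (c.1 + d.1, c.2 + d.2) &&
          !PySem.Set.contains (PySem.Set.add seen c) (c.1 + d.1, c.2 + d.2))).map
          (fun d : Int × Int => (c.1 + d.1, c.2 + d.2))), okb grid n m d = true := by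
      intro d hd
      rcases (hQmem d).mp hd with h | h
      · exact hq d (List.mem_cons_of_mem _ h)
      · exact h.2.1
    obtain ⟨ih1, ih2⟩ := ih hq'
    have hpop := nwp_pop (grid := grid) (n := n) (m := m) (S := (· ∈ seen)) hcnot hQmem
    have hcongr := nwp_congr (grid := grid) (n := n) (m := m)
      (S := (· ∈ PySem.Set.add seen c)) (S' := fun y => y ∈ seen ∨ y = c)
      (fun y => PySem.Set.mem_add seen c y)
    have hnotc : ¬ NWP grid n m (fun y => y ∈ seen ∨ y = c) (rest ++
        ((dirsA.filter (fun d : Int × Int => okb grid n m (c.1 + d.1, c.2 + d.2) &&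
          !PySem.Set.contains (PySem.Set.add seen c) (c.1 + d.1, c.2 + d.2))).map
          (fun d : Int × Int => (c.1 + d.1, c.2 + d.2)))) c :=
      fun h => nwp_not_blocked h (Or.inr rfl)
    have hsum : compSum grid n m (NWP grid n m (· ∈ seen) (c :: rest)) =
        gAt grid c.1 c.2 + compSum grid n m (NWP grid n m (· ∈ PySem.Set.add seen c) (rest ++
          ((dirsA.filter (fun d : Int × Int => okb grid n m (c.1 + d.1, c.2 + d.2) &&
            !PySem.Set.contains (PySem.Set.add seen c) (c.1 + d.1, c.2 + d.2))).map
            (fun d : Int × Int => (c.1 + d.1, c.2 + d.2))))) := by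
      rw [compSum_insert (okb_mem_allCells (hq c List.mem_cons_self)) hpop hnotc]
      congr 1
      exact (compSum_congr (fun x => hcongr _ x)).symm
    rw [bfsLoop_cons, if_neg hcont, hfold]
    constructor
    · rw [ih1, hsum]
      ring
    · intro x
      rw [ih2 x, PySem.Set.mem_add, hcongr _ x, hpop x]
      tauto

-- ===== generic connectivity lemmas =====

lemma mem_nbrs_symm {x y : Int × Int} : y ∈ nbrs x ↔ x ∈ nbrs y := by
  rcases x with ⟨a, b⟩; rcases y with ⟨c, d⟩
  simp only [nbrs, List.mem_cons, List.not_mem_nil, or_false, Prod.mk.injEq]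
  constructor <;> rintro (⟨h1, h2⟩ | ⟨h1, h2⟩ | ⟨h1, h2⟩ | ⟨h1, h2⟩) <;> omega

lemma conn_symm {K : Int × Int → Prop} {a b : Int × Int} (h : Conn K a b) : Conn K b a := by
  refine Relation.ReflTransGen.symmetric ?_ h
  intro x y hxy
  exact ⟨mem_nbrs_symm.mp hxy.1, hxy.2.2, hxy.2.1⟩

lemma conn_trans {K : Int × Int → Prop} {a b c : Int × Int}
    (h1 : Conn K a b) (h2 : Conn K b c) : Conn K a c :=
  Relation.ReflTransGen.trans h1 h2

lemma conn_k_right {K : Int × Int → Prop} {a b : Int × Int} (h : Conn K a b) :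
    b = a ∨ K b := by
  rcases Relation.ReflTransGen.cases_tail h with rfl | ⟨y, _, hstep⟩
  · exact Or.inl rfl
  · exact Or.inr hstep.2.2

lemma cval_eq_of_conn {grid : List (List Int)} {n m : Int} {a b : Int × Int}
    (h : Conn (KA grid n m) a b) : cval grid n m a = cval grid n m b := by
  unfold cval
  exact compSum_congr (fun x => ⟨fun hx => conn_trans (conn_symm h) hx,
    fun hx => conn_trans h hx⟩)

-- A's BFS reach from an ok start is exactly grid connectivity, when nothing
-- connected to the start is blocked
lemma reachR_to_conn {grid : List (List Int)} {n m : Int} {S : Int × Int → Prop}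
    {c x : Int × Int} (hc : okb grid n m c = true) (h : ReachR grid n m S c x) :
    Conn (KA grid n m) c x := by
  induction h with
  | refl => exact Relation.ReflTransGen.refl
  | @tail y z _ hstep ih =>
    have hy : okb grid n m y = true := by
      rcases conn_k_right ih with rfl | h'
      · exact hc
      · exact h'
    exact ih.tail ⟨hstep.1, hy, hstep.2.1⟩

lemma conn_to_reachR {grid : List (List Int)} {n m : Int} {S : Int × Int → Prop}
    {c x : Int × Int} (hS : ∀ y, Conn (KA grid n m) c y → ¬ S y)
    (h : Conn (KA grid n m) c x) : ReachR grid n m S c x := by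
  induction h with
  | refl => exact Relation.ReflTransGen.refl
  | @tail y z hcy hstep ih =>
    exact ih.tail ⟨hstep.1, hstep.2.2, hS z (hcy.tail hstep)⟩

-- ===== A-side: outer loop invariant =====

def AInv (grid : List (List Int)) (n m : Int) (P : List (Int × Int))
    (st : Int × PySem.Set (Int × Int)) : Prop :=
  0 ≤ st.1 ∧
  (∀ c, okb grid n m c = true → c ∈ P → cval grid n m c ≤ st.1) ∧
  (st.1 = 0 ∨ ∃ c, okb grid n m c = true ∧ c ∈ P ∧ st.1 = cval grid n m c) ∧
  (∀ x, x ∈ st.2 ↔ ∃ e, okb grid n m e = true ∧ e ∈ P ∧ Conn (KA grid n m) e x)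

def stepACell (grid : List (List Int)) (n m : Int)
    (st : Int × PySem.Set (Int × Int)) (c : Int × Int) : Int × PySem.Set (Int × Int) :=
  if ¬ PySem.Set.contains st.2 c ∧ gAt grid c.1 c.2 ≠ 0 then
    let r := bfsLoop grid n m [c] st.2 0
    (max st.1 r.1, r.2)
  else st

lemma solve_as_fold (grid : List (List Int)) (n m : Int) :
    solve grid n m = ((allCells n m).foldl (stepACell grid n m) ((0 : Int), PySem.Set.empty)).1 := by
  unfold solve allCells
  rw [List.foldl_flatMap]
  simp only [List.foldl_map]
  rfl

lemma a_cell_step (grid : List (List Int)) (n m : Int) (P : List (Int × Int))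
    (c : Int × Int) (hcm : c ∈ allCells n m) (st : Int × PySem.Set (Int × Int))
    (hinv : AInv grid n m P st) : AInv grid n m (P ++ [c]) (stepACell grid n m st c) := by
  obtain ⟨h0, hub, hwit, hseen⟩ := hinv
  unfold stepACell
  by_cases hbr : ¬ PySem.Set.contains st.2 c ∧ gAt grid c.1 c.2 ≠ 0
  · rw [if_pos hbr]
    show AInv grid n m (P ++ [c])
      (max st.1 (bfsLoop grid n m [c] st.2 0).1, (bfsLoop grid n m [c] st.2 0).2)
    have hok : okb grid n m c = true := by
      obtain ⟨⟨hb1, hb2⟩, hb3, hb4⟩ := mem_allCells.mp hcm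
      simp [okb, hb1, hb2, hb3, hb4, hbr.2]
    have hcs : c ∉ st.2 := fun h => hbr.1 ((PySem.Set.contains_iff _ _).mpr h)
    obtain ⟨b1, b2⟩ := bfs_char grid n m [c] st.2 0
      (by intro d hd; rw [List.mem_singleton.mp hd]; exact hok)
    have hblock : ∀ y, Conn (KA grid n m) c y → y ∉ st.2 := by
      intro y hy hyS
      obtain ⟨e, he, heP, hconn⟩ := (hseen y).mp hyS
      exact hcs ((hseen c).mpr ⟨e, he, heP, conn_trans hconn (conn_symm hy)⟩)
    have key : ∀ x, NWP grid n m (· ∈ st.2) [c] x ↔ Conn (KA grid n m) c x := by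
      intro x
      constructor
      · rintro ⟨q, hq, _, hr⟩
        rw [List.mem_singleton.mp hq] at hr
        exact reachR_to_conn hok hr
      · intro h
        exact ⟨c, List.mem_singleton_self _, hcs, conn_to_reachR hblock h⟩
    have b1' : (bfsLoop grid n m [c] st.2 0).1 = cval grid n m c := by
      rw [b1, compSum_congr key]; unfold cval; ring
    refine ⟨le_trans h0 (le_max_left _ _), ?_, ?_, ?_⟩
    · intro d hd hdP
      rcases List.mem_append.mp hdP with h' | h'
      · exact le_trans (hub d hd h') (le_max_left _ _)
      · rw [List.mem_singleton.mp h', ← b1']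
        exact le_max_right _ _
    · rcases le_total (bfsLoop grid n m [c] st.2 0).1 st.1 with h' | h'
      · rw [max_eq_left h']
        rcases hwit with h'' | ⟨d, hd1, hd2, hd3⟩
        · exact Or.inl h''
        · exact Or.inr ⟨d, hd1, List.mem_append.mpr (Or.inl hd2), hd3⟩
      · rw [max_eq_right h']
        exact Or.inr ⟨c, hok, List.mem_append.mpr (Or.inr (List.mem_singleton_self c)), b1'⟩
    · intro x
      rw [b2 x, hseen x, key x]
      constructor
      · rintro (⟨e, he1, he2, he3⟩ | h')
        · exact ⟨e, he1, List.mem_append.mpr (Or.inl he2), he3⟩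
        · exact ⟨c, hok, List.mem_append.mpr (Or.inr (List.mem_singleton_self c)), h'⟩
      · rintro ⟨e, he1, he2, he3⟩
        rcases List.mem_append.mp he2 with h' | h'
        · exact Or.inl ⟨e, he1, h', he3⟩
        · rw [List.mem_singleton.mp h'] at he3
          exact Or.inr he3
  · rw [if_neg hbr]
    have hbr' : PySem.Set.contains st.2 c = true ∨ gAt grid c.1 c.2 = 0 := by
      by_cases h1 : PySem.Set.contains st.2 c = true
      · exact Or.inl h1
      · by_cases h2 : gAt grid c.1 c.2 = 0
        · exact Or.inr h2
        · exact absurd ⟨h1, h2⟩ hbr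
    have hcseen : okb grid n m c = true → c ∈ st.2 := by
      intro hok
      rcases hbr' with h' | h'
      · exact (PySem.Set.contains_iff _ _).mp h'
      · exfalso
        simp only [okb, Bool.and_eq_true, decide_eq_true_eq] at hok
        exact hok.2 h'
    refine ⟨h0, ?_, ?_, ?_⟩
    · intro d hd hdP
      rcases List.mem_append.mp hdP with h' | h'
      · exact hub d hd h'
      · rw [List.mem_singleton.mp h'] at hd ⊢
        obtain ⟨e, he1, he2, he3⟩ := (hseen c).mp (hcseen hd)
        rw [cval_eq_of_conn (conn_symm he3)]
        exact hub e he1 he2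
    · rcases hwit with h'' | ⟨d, hd1, hd2, hd3⟩
      · exact Or.inl h''
      · exact Or.inr ⟨d, hd1, List.mem_append.mpr (Or.inl hd2), hd3⟩
    · intro x
      rw [hseen x]
      constructor
      · rintro ⟨e, he1, he2, he3⟩
        exact ⟨e, he1, List.mem_append.mpr (Or.inl he2), he3⟩
      · rintro ⟨e, he1, he2, he3⟩
        rcases List.mem_append.mp he2 with h' | h'
        · exact ⟨e, he1, h', he3⟩
        · rw [List.mem_singleton.mp h'] at he1 he3
          obtain ⟨e', g1, g2, g3⟩ := (hseen c).mp (hcseen he1)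
          exact ⟨e', g1, g2, conn_trans g3 he3⟩

lemma a_fold_inv (grid : List (List Int)) (n m : Int) :
    ∀ (suf P : List (Int × Int)), (∀ c ∈ suf, c ∈ allCells n m) →
      ∀ st, AInv grid n m P st →
        AInv grid n m (P ++ suf) (suf.foldl (stepACell grid n m) st) := by
  intro suf
  induction suf with
  | nil => intro P _ st h; simpa using h
  | cons c rest ih =>
    intro P hmem st h
    have h' := a_cell_step grid n m P c (hmem c List.mem_cons_self) st h
    have := ih (P ++ [c]) (fun d hd => hmem d (List.mem_cons_of_mem _ hd))
      (stepACell grid n m st c) h'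
    simpa [List.append_assoc] using this

-- ===== B-side: union-merge invariant =====

-- connectivity generated by an explicit list of (undirected) union edges
def EConn (E : List ((Int × Int) × (Int × Int))) : Int × Int → Int × Int → Prop :=
  Relation.ReflTransGen (fun x y => (x, y) ∈ E ∨ (y, x) ∈ E)

lemma econn_symm {E : List ((Int × Int) × (Int × Int))} {a b : Int × Int}
    (h : EConn E a b) : EConn E b a := by
  refine Relation.ReflTransGen.symmetric ?_ h
  intro x y hxy
  exact hxy.symm

lemma econn_mono {E E' : List ((Int × Int) × (Int × Int))} (hE : ∀ e ∈ E, e ∈ E')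
    {a b : Int × Int} (h : EConn E a b) : EConn E' a b :=
  Relation.ReflTransGen.mono (fun _ _ hxy => hxy.imp (hE _) (hE _)) h

lemma econn_append_single {E : List ((Int × Int) × (Int × Int))} {c p a b : Int × Int} :
    EConn (E ++ [(c, p)]) a b ↔
      EConn E a b ∨ (EConn E a c ∧ EConn E p b) ∨ (EConn E a p ∧ EConn E c b) := by
  constructor
  · intro h
    induction h with
    | refl => exact Or.inl Relation.ReflTransGen.refl
    | @tail y z _ hstep ih =>
      have hstep' : ((y, z) ∈ E ∨ (z, y) ∈ E) ∨ ((y = c ∧ z = p) ∨ (y = p ∧ z = c)) := by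
        rcases hstep with h1 | h1 <;> rcases List.mem_append.mp h1 with h2 | h2
        · exact Or.inl (Or.inl h2)
        · rcases List.mem_singleton.mp h2 with h3
          exact Or.inr (Or.inl ⟨congrArg Prod.fst h3, congrArg Prod.snd h3⟩)
        · exact Or.inl (Or.inr h2)
        · rcases List.mem_singleton.mp h2 with h3
          exact Or.inr (Or.inr ⟨congrArg Prod.snd h3, congrArg Prod.fst h3⟩)
      rcases hstep' with h1 | h1
      · rcases ih with h2 | ⟨h2, h3⟩ | ⟨h2, h3⟩
        · exact Or.inl (h2.tail h1)
        · exact Or.inr (Or.inl ⟨h2, h3.tail h1⟩)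
        · exact Or.inr (Or.inr ⟨h2, h3.tail h1⟩)
      · rcases h1 with ⟨hy, hz⟩ | ⟨hy, hz⟩ <;> subst hy <;> subst hz
        · rcases ih with h2 | ⟨h2, _⟩ | ⟨h2, _⟩
          · exact Or.inr (Or.inl ⟨h2, Relation.ReflTransGen.refl⟩)
          · exact Or.inr (Or.inl ⟨h2, Relation.ReflTransGen.refl⟩)
          · exact Or.inl h2
        · rcases ih with h2 | ⟨h2, _⟩ | ⟨h2, _⟩
          · exact Or.inr (Or.inr ⟨h2, Relation.ReflTransGen.refl⟩)
          · exact Or.inl h2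
          · exact Or.inr (Or.inr ⟨h2, Relation.ReflTransGen.refl⟩)
  · have hsub : ∀ {u v : Int × Int}, EConn E u v → EConn (E ++ [(c, p)]) u v :=
      fun h => econn_mono (fun e he => List.mem_append.mpr (Or.inl he)) h
    have hcp : EConn (E ++ [(c, p)]) c p :=
      Relation.ReflTransGen.single (Or.inl (List.mem_append.mpr (Or.inr (List.mem_singleton_self _))))
    rintro (h | ⟨h1, h2⟩ | ⟨h1, h2⟩)
    · exact hsub h
    · exact Relation.ReflTransGen.trans (hsub h1) (Relation.ReflTransGen.trans hcp (hsub h2))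
    · exact Relation.ReflTransGen.trans (hsub h1)
        (Relation.ReflTransGen.trans (econn_symm hcp) (hsub h2))

lemma econn_isolated {E : List ((Int × Int) × (Int × Int))} {V : Int × Int → Prop}
    {c b : Int × Int} (hsup : ∀ e ∈ E, V e.1 ∧ V e.2) (hc : ¬ V c)
    (h : EConn E c b) : b = c := by
  rcases Relation.ReflTransGen.cases_head h with rfl | ⟨d, hstep, _⟩
  · rfl
  · exfalso
    rcases hstep with h1 | h1
    · exact hc (hsup _ h1).1
    · exact hc (hsup _ h1).2

-- lookups after the relabeling loop "for q in members[r1]: comp[q] = r2"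
lemma get?_foldl_insert_const (l : List (Int × Int)) (r : Int × Int)
    (d : PySem.Dict (Int × Int) (Int × Int)) (x : Int × Int) :
    (l.foldl (fun d q => d.insert q r) d).get? x = if x ∈ l then some r else d.get? x := by
  induction l generalizing d with
  | nil => simp
  | cons a l ih =>
    simp only [List.foldl_cons, ih, PySem.Dict.get?_insert, List.mem_cons]
    by_cases hx : x ∈ l
    · simp [hx]
    · by_cases hxa : x = a <;> simp [hx, hxa]

-- lookups in an erased dict (PySem.Dict.erase has no lemma book; proved here at items level)
lemma find?_filter_ne {κ ν : Type} [BEq κ] [LawfulBEq κ] (items : List (κ × ν)) (k x : κ)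
    (hne : x ≠ k) :
    (items.filter (fun p => !(p.1 == k))).find? (fun p => p.1 == x) =
      items.find? (fun p => p.1 == x) := by
  induction items with
  | nil => rfl
  | cons a l ih =>
    by_cases hak : a.1 = k
    · rw [List.filter_cons_of_neg (by simp [hak]), ih,
        List.find?_cons_of_neg (by simp [hak]; exact fun h => hne h.symm)]
    · by_cases hax : a.1 = x
      · rw [List.filter_cons_of_pos (by simp [hak]), List.find?_cons_of_pos (by simp [hax]),
          List.find?_cons_of_pos (by simp [hax])]
      · rw [List.filter_cons_of_pos (by simp [hak]), List.find?_cons_of_neg (by simp [hax]),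
          List.find?_cons_of_neg (by simp [hax]), ih]

lemma get?_erase_of_ne {ν : Type} (d : PySem.Dict (Int × Int) ν) (k x : Int × Int)
    (hne : x ≠ k) : (d.erase k).get? x = d.get? x := by
  show ((d.items.filter (fun p => !(p.1 == k))).find? (fun p => p.1 == x)).map (·.2) =
    (d.items.find? (fun p => p.1 == x)).map (·.2)
  rw [find?_filter_ne _ _ _ hne]

lemma get?_erase_self {ν : Type} (d : PySem.Dict (Int × Int) ν) (k : Int × Int) :
    (d.erase k).get? k = none := by
  show ((d.items.filter (fun p => !(p.1 == k))).find? (fun p => p.1 == k)).map (·.2) = none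
  rw [List.find?_eq_none.mpr]
  · rfl
  · intro p hp
    simp only [List.mem_filter, Bool.not_eq_true'] at hp
    simp [hp.2]

lemma nodup_keys_erase {ν : Type} (d : PySem.Dict (Int × Int) ν) (k : Int × Int)
    (h : d.keys.Nodup) : (d.erase k).keys.Nodup := by
  have hsub : (d.erase k).items.Sublist d.items := List.filter_sublist
  exact (hsub.map Prod.fst).nodup h

-- ===== row-major geometry =====

def rmlt (a b : Int × Int) : Prop := a.1 < b.1 ∨ (a.1 = b.1 ∧ a.2 < b.2)

lemma pyRange_one_pairwise (a b : Int) : (PySem.List.pyRange a b 1).Pairwise (· < ·) := by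
  by_cases h : a < b
  · rw [PySem.List.pyRange_one_cons h]
    refine List.Pairwise.cons ?_ ?_
    · intro y hy
      have := (PySem.List.mem_pyRange_one).mp hy
      omega
    · have : (b - (a + 1)).toNat < (b - a).toNat := by omega
      exact pyRange_one_pairwise (a + 1) b
  · rw [PySem.List.pyRange_one_eq_nil (by omega)]
    exact List.Pairwise.nil
  termination_by (b - a).toNat

lemma allCells_pairwise (n m : Int) : (allCells n m).Pairwise rmlt := by
  unfold allCells
  apply List.pairwise_flatMap.mpr
  refine ⟨?_, ?_⟩
  · intro i _
    refine List.pairwise_map.mpr ?_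
    refine (pyRange_one_pairwise 0 m).imp ?_
    intro j j' h
    exact Or.inr ⟨rfl, h⟩
  · refine (pyRange_one_pairwise 0 n).imp ?_
    intro i i' h x hx y hy
    obtain ⟨j, _, rfl⟩ := List.mem_map.mp hx
    obtain ⟨j', _, rfl⟩ := List.mem_map.mp hy
    exact Or.inl h

lemma allCells_nodup (n m : Int) : (allCells n m).Nodup := by
  refine List.Pairwise.imp ?_ (allCells_pairwise n m)
  intro a b h
  rcases h with h | ⟨h1, h2⟩
  · intro he; rw [he] at h; omega
  · intro he; rw [he] at h2; omega

lemma prevNbrs_rmlt {c p : Int × Int} (h : p ∈ prevNbrs c) : rmlt p c := by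
  simp only [prevNbrs, List.mem_cons, List.not_mem_nil, or_false] at h
  rcases h with rfl | rfl
  · exact Or.inl (by show c.1 - 1 < c.1; omega)
  · exact Or.inr ⟨rfl, by show c.2 - 1 < c.2; omega⟩

lemma prevNbrs_mem_nbrs {c p : Int × Int} (h : p ∈ prevNbrs c) : p ∈ nbrs c := by
  simp only [prevNbrs, List.mem_cons, List.not_mem_nil, or_false] at h
  rcases h with rfl | rfl <;> simp [nbrs]

-- cells already registered after processing the prefix P of the row-major scan
def KeyOf (grid : List (List Int)) (n m : Int) (P : List (Int × Int)) (x : Int × Int) : Prop :=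
  okb grid n m x = true ∧ x ∈ P

-- all union edges offered while processing the prefix P
def edgesOf (grid : List (List Int)) (n m : Int) (P : List (Int × Int)) :
    List ((Int × Int) × (Int × Int)) :=
  (P.filter (okb grid n m)).flatMap
    (fun c => ((prevNbrs c).filter (okb grid n m)).map (fun p => (c, p)))

-- the full invariant of B's labeling state: comp's keys are V, representative
-- equality is exactly edge connectivity, member lists and sums describe the classes
def BInv (grid : List (List Int)) (n m : Int) (V : Int × Int → Prop)
    (E : List ((Int × Int) × (Int × Int))) (st : BState) : Prop :=
  st.2.2.keys.Nodup ∧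
  (∀ a, (st.1.get? a).isSome ↔ V a) ∧
  (∀ a r, st.1.get? a = some r → st.1.get? r = some r) ∧
  (∀ a b ra rb, st.1.get? a = some ra → st.1.get? b = some rb → (ra = rb ↔ EConn E a b)) ∧
  (∀ r l, st.2.1.get? r = some l → st.1.get? r = some r ∧ ∀ x, x ∈ l ↔ st.1.get? x = some r) ∧
  (∀ r, st.1.get? r = some r → (st.2.1.get? r).isSome) ∧
  (∀ r s, st.2.2.get? r = some s → st.1.get? r = some r ∧
      s = compSum grid n m (fun x => st.1.get? x = some r)) ∧
  (∀ r, st.1.get? r = some r → (st.2.2.get? r).isSome) ∧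
  (∀ e ∈ E, V e.1 ∧ V e.2)

lemma binv_congr {grid : List (List Int)} {n m : Int} {V V' : Int × Int → Prop}
    {E : List ((Int × Int) × (Int × Int))} {st : BState}
    (hV : ∀ x, V x ↔ V' x) (h : BInv grid n m V E st) : BInv grid n m V' E st := by
  obtain ⟨h1, h2, h3, h4, h5, h6, h7, h8, h9⟩ := h
  exact ⟨h1, fun a => (h2 a).trans (hV a), h3, h4, h5, h6, h7, h8,
    fun e he => ⟨(hV _).mp (h9 e he).1, (hV _).mp (h9 e he).2⟩⟩

lemma binv_add_vertex {grid : List (List Int)} {n m : Int} {V : Int × Int → Prop}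
    {E : List ((Int × Int) × (Int × Int))}
    {comp : PySem.Dict (Int × Int) (Int × Int)}
    {members : PySem.Dict (Int × Int) (List (Int × Int))}
    {sums : PySem.Dict (Int × Int) Int} {c : Int × Int}
    (h : BInv grid n m V E (comp, members, sums)) (hc : ¬ V c) (hcm : c ∈ allCells n m) :
    BInv grid n m (fun x => V x ∨ x = c) E
      (comp.insert c c, members.insert c [c], sums.insert c (gAt grid c.1 c.2)) := by
  obtain ⟨h1, h2, h3, h4, h5, h6, h7, h8, h9⟩ := h
  have hVsome : ∀ {a r : Int × Int}, comp.get? a = some r → V a := by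
    intro a r ha
    exact (h2 a).mp (by rw [ha]; rfl)
  have hrne : ∀ {a r : Int × Int}, comp.get? a = some r → r ≠ c := by
    intro a r ha he
    exact hc (he ▸ hVsome (h3 _ _ ha))
  have hg' : ∀ x, (comp.insert c c).get? x = if x = c then some c else comp.get? x :=
    fun x => by rw [PySem.Dict.get?_insert]
  have hclass_c : ∀ x, (comp.insert c c).get? x = some c ↔ x = c := by
    intro x
    rw [hg' x]
    by_cases hx : x = c
    · simp [hx]
    · simp only [hx, if_false, iff_false]
      intro hcx
      exact hrne hcx rfl
  refine ⟨PySem.Dict.nodup_keys_insert _ _ _ h1, ?_, ?_, ?_, ?_, ?_, ?_, ?_, ?_⟩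
  · intro a
    rw [hg' a]
    by_cases hx : a = c
    · simp [hx]
    · simp only [hx, if_false, or_false]
      exact h2 a
  · intro a r ha
    rw [hg' a] at ha
    by_cases hx : a = c
    · rw [if_pos hx] at ha
      obtain rfl := Option.some.inj ha
      rw [hg' _, if_pos rfl]
    · rw [if_neg hx] at ha
      rw [hg' r, if_neg (hrne ha), h3 _ _ ha]
  · intro a b ra rb ha hb
    rw [hg' a] at ha
    rw [hg' b] at hb
    by_cases hxa : a = c <;> by_cases hxb : b = c
    · subst hxa; subst hxb
      rw [if_pos rfl] at ha hb
      obtain rfl := Option.some.inj ha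
      obtain rfl := Option.some.inj hb
      simp only [true_iff]
      exact Relation.ReflTransGen.refl
    · subst hxa
      rw [if_pos rfl] at ha
      rw [if_neg hxb] at hb
      obtain rfl := Option.some.inj ha
      constructor
      · intro he; exact absurd he.symm (hrne hb)
      · intro he; exact absurd (econn_isolated h9 hc he) hxb
    · subst hxb
      rw [if_pos rfl] at hb
      rw [if_neg hxa] at ha
      obtain rfl := Option.some.inj hb
      constructor
      · intro he; exact absurd he (hrne ha)
      · intro he; exact absurd (econn_isolated h9 hc (econn_symm he)) hxa
    · rw [if_neg hxa] at ha
      rw [if_neg hxb] at hb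
      exact h4 a b ra rb ha hb
  · intro r l hrl
    rw [PySem.Dict.get?_insert] at hrl
    by_cases hx : r = c
    · subst hx
      rw [if_pos rfl] at hrl
      obtain rfl := Option.some.inj hrl
      refine ⟨(hclass_c r).mpr rfl, ?_⟩
      intro x
      rw [hclass_c x, List.mem_singleton]
    · rw [if_neg hx] at hrl
      obtain ⟨hroot, hcls⟩ := h5 _ _ hrl
      refine ⟨by rw [hg' r, if_neg hx]; exact hroot, ?_⟩
      intro x
      rw [hcls x, hg' x]
      by_cases hxc : x = c
      · subst hxc
        rw [if_pos rfl]
        constructor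
        · intro hcx; exact absurd hcx (fun h => hc (hVsome h))
        · intro hcx; exact absurd (Option.some.inj hcx) (Ne.symm hx)
      · rw [if_neg hxc]
  · intro r hr
    rw [hg' r] at hr
    by_cases hx : r = c
    · subst hx
      rw [PySem.Dict.get?_insert, if_pos rfl]
      rfl
    · rw [if_neg hx] at hr
      rw [PySem.Dict.get?_insert, if_neg hx]
      exact h6 _ hr
  · intro r s hrs
    rw [PySem.Dict.get?_insert] at hrs
    by_cases hx : r = c
    · subst hx
      rw [if_pos rfl] at hrs
      obtain rfl := Option.some.inj hrs
      refine ⟨(hclass_c r).mpr rfl, ?_⟩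
      rw [compSum_insert hcm
        (P' := fun _ => False)
        (fun x => by rw [hclass_c x]; exact ⟨Or.inl, fun h => h.elim id False.elim⟩)
        not_false, compSum_empty (fun x h => h)]
      ring
    · rw [if_neg hx] at hrs
      obtain ⟨hroot, hsum⟩ := h7 _ _ hrs
      refine ⟨by rw [hg' r, if_neg hx]; exact hroot, ?_⟩
      rw [hsum]
      apply compSum_congr
      intro x
      rw [hg' x]
      by_cases hxc : x = c
      · subst hxc
        rw [if_pos rfl]
        constructor
        · intro hcx; exact absurd hcx (fun h => hc (hVsome h))
        · intro hcx; exact absurd (Option.some.inj hcx) (Ne.symm hx)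
      · rw [if_neg hxc]
  · intro r hr
    rw [hg' r] at hr
    by_cases hx : r = c
    · subst hx
      rw [PySem.Dict.get?_insert, if_pos rfl]
      rfl
    · rw [if_neg hx] at hr
      rw [PySem.Dict.get?_insert, if_neg hx]
      exact h8 _ hr
  · intro e he
    exact ⟨Or.inl (h9 e he).1, Or.inl (h9 e he).2⟩

set_option maxHeartbeats 1600000 in
lemma merge_core {grid : List (List Int)} {n m : Int} {V : Int × Int → Prop}
    {E : List ((Int × Int) × (Int × Int))}
    {comp : PySem.Dict (Int × Int) (Int × Int)}
    {members : PySem.Dict (Int × Int) (List (Int × Int))}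
    {sums : PySem.Dict (Int × Int) Int} {c p rc rp s1 s2 : Int × Int}
    (h : BInv grid n m V E (comp, members, sums))
    (hgc : comp.get? c = some rc) (hgp : comp.get? p = some rp) (hne : rc ≠ rp)
    (hs : (s1 = rc ∧ s2 = rp) ∨ (s1 = rp ∧ s2 = rc)) :
    BInv grid n m V (E ++ [(c, p)])
      ((members.getD s1 []).foldl (fun d q => d.insert q s2) comp,
       (members.insert s2 (members.getD s2 [] ++ members.getD s1 [])).erase s1,
       (sums.insert s2 (sums.getD s2 0 + sums.getD s1 0)).erase s1) := by
  obtain ⟨h1, h2, h3, h4, h5, h6, h7, h8, h9⟩ := h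
  have hVsome : ∀ {a r : Int × Int}, comp.get? a = some r → V a := by
    intro a r ha
    exact (h2 a).mp (by rw [ha]; rfl)
  have hrc : comp.get? rc = some rc := h3 _ _ hgc
  have hrp : comp.get? rp = some rp := h3 _ _ hgp
  have hg1 : comp.get? s1 = some s1 := by
    rcases hs with ⟨h', _⟩ | ⟨h', _⟩ <;> rw [h']
    · exact hrc
    · exact hrp
  have hg2 : comp.get? s2 = some s2 := by
    rcases hs with ⟨_, h'⟩ | ⟨_, h'⟩ <;> rw [h']
    · exact hrp
    · exact hrc
  have hs12 : s1 ≠ s2 := by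
    rcases hs with ⟨h', h''⟩ | ⟨h', h''⟩ <;> rw [h', h'']
    · exact hne
    · exact hne.symm
  obtain ⟨l1, hl1⟩ := Option.isSome_iff_exists.mp (h6 _ hg1)
  obtain ⟨l2, hl2⟩ := Option.isSome_iff_exists.mp (h6 _ hg2)
  obtain ⟨σ1, hσ1⟩ := Option.isSome_iff_exists.mp (h8 _ hg1)
  obtain ⟨σ2, hσ2⟩ := Option.isSome_iff_exists.mp (h8 _ hg2)
  have hd1 : members.getD s1 [] = l1 := by
    rw [PySem.Dict.getD_eq_get?_getD, hl1]; rfl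
  have hd2 : members.getD s2 [] = l2 := by
    rw [PySem.Dict.getD_eq_get?_getD, hl2]; rfl
  have hsd1 : sums.getD s1 0 = σ1 := by
    rw [PySem.Dict.getD_eq_get?_getD, hσ1]; rfl
  have hsd2 : sums.getD s2 0 = σ2 := by
    rw [PySem.Dict.getD_eq_get?_getD, hσ2]; rfl
  have class1 : ∀ x, x ∈ l1 ↔ comp.get? x = some s1 := (h5 _ _ hl1).2
  have class2 : ∀ x, x ∈ l2 ↔ comp.get? x = some s2 := (h5 _ _ hl2).2
  have hσ1eq : σ1 = compSum grid n m (fun x => comp.get? x = some s1) := (h7 _ _ hσ1).2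
  have hσ2eq : σ2 = compSum grid n m (fun x => comp.get? x = some s2) := (h7 _ _ hσ2).2
  have hC : ∀ x, ((members.getD s1 []).foldl
      (fun d q => d.insert q s2) comp).get? x =
      if comp.get? x = some s1 then some s2 else comp.get? x := by
    intro x
    rw [hd1, get?_foldl_insert_const]
    by_cases hx : comp.get? x = some s1
    · rw [if_pos ((class1 x).mpr hx), if_pos hx]
    · rw [if_neg (fun hm => hx ((class1 x).mp hm)), if_neg hx]
  have hCs2 : ((members.getD s1 []).foldl (fun d q => d.insert q s2) comp).get? s2 = some s2 := by
    rw [hC]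
    rw [if_neg (fun h' => hs12 (Option.some.inj (hg2 ▸ h')).symm)]
    exact hg2
  have hs21 : s2 ≠ s1 := fun e => hs12 e.symm
  refine ⟨nodup_keys_erase _ _ (PySem.Dict.nodup_keys_insert _ _ _ h1), ?_, ?_, ?_, ?_, ?_, ?_, ?_, ?_⟩
  · -- keys
    intro a
    by_cases hcond : comp.get? a = some s1
    · rw [hC, if_pos hcond]
      exact ⟨fun _ => hVsome hcond, fun _ => rfl⟩
    · rw [hC, if_neg hcond]
      exact h2 a
  · -- roots
    intro a r ha
    rw [hC] at ha
    by_cases hcond : comp.get? a = some s1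
    · rw [if_pos hcond] at ha
      obtain rfl := Option.some.inj ha
      exact hCs2
    · rw [if_neg hcond] at ha
      have hroot := h3 _ _ ha
      have hrs1 : r ≠ s1 := fun e => hcond (by rw [e] at ha; exact ha)
      rw [hC, if_neg (fun h' => hrs1 (Option.some.inj (hroot ▸ h')))]
      exact hroot
  · -- representative equality ↔ edge connectivity
    intro a b ra' rb' ha hb
    rw [hC] at ha hb
    have hdeca : ∃ ra, comp.get? a = some ra ∧ ra' = if ra = s1 then s2 else ra := by
      by_cases hcond : comp.get? a = some s1
      · rw [if_pos hcond] at ha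
        exact ⟨s1, hcond, by rw [if_pos rfl]; exact (Option.some.inj ha).symm⟩
      · rw [if_neg hcond] at ha
        exact ⟨ra', ha, by rw [if_neg (fun e => hcond (by rw [e] at ha; exact ha))]⟩
    have hdecb : ∃ rb, comp.get? b = some rb ∧ rb' = if rb = s1 then s2 else rb := by
      by_cases hcond : comp.get? b = some s1
      · rw [if_pos hcond] at hb
        exact ⟨s1, hcond, by rw [if_pos rfl]; exact (Option.some.inj hb).symm⟩
      · rw [if_neg hcond] at hb
        exact ⟨rb', hb, by rw [if_neg (fun e => hcond (by rw [e] at hb; exact hb))]⟩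
    obtain ⟨ra, hra, hraE⟩ := hdeca
    obtain ⟨rb, hrb, hrbE⟩ := hdecb
    have e1 := h4 a b ra rb hra hrb
    have e2 := h4 a c ra rc hra hgc
    have e3 := h4 p b rp rb hgp hrb
    have e4 := h4 a p ra rp hra hgp
    have e5 := h4 c b rc rb hgc hrb
    rw [econn_append_single, ← e1, ← e2, ← e3, ← e4, ← e5, hraE, hrbE]
    have hkey : (if ra = s1 then s2 else ra) = (if rb = s1 then s2 else rb) ↔
        ra = rb ∨ (ra = s1 ∧ s2 = rb) ∨ (ra = s2 ∧ s1 = rb) := by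
      by_cases hA : ra = s1 <;> by_cases hB : rb = s1
      · rw [if_pos hA, if_pos hB]
        exact ⟨fun _ => Or.inl (hA.trans hB.symm), fun _ => rfl⟩
      · rw [if_pos hA, if_neg hB]
        constructor
        · intro h'; exact Or.inr (Or.inl ⟨hA, h'⟩)
        · rintro (h' | ⟨_, h'⟩ | ⟨h', _⟩)
          · exact absurd (h'.symm.trans hA) hB
          · exact h'
          · exact absurd (hA.symm.trans h') hs12
      · rw [if_neg hA, if_pos hB]
        constructor
        · intro h'; exact Or.inr (Or.inr ⟨h', hB.symm⟩)
        · rintro (h' | ⟨h', h''⟩ | ⟨h', _⟩)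
          · exact absurd (h'.trans hB) hA
          · exact absurd (h''.trans hB) hs21
          · exact h'
      · rw [if_neg hA, if_neg hB]
        constructor
        · intro h'; exact Or.inl h'
        · rintro (h' | ⟨h', h''⟩ | ⟨h', h''⟩)
          · exact h'
          · exact absurd h' hA
          · exact absurd h''.symm hB
    rw [hkey]
    rcases hs with ⟨hq1, hq2⟩ | ⟨hq1, hq2⟩
    · rw [hq1, hq2]
    · rw [hq1, hq2]
      constructor
      · rintro (h' | h' | h')
        exacts [Or.inl h', Or.inr (Or.inr h'), Or.inr (Or.inl h')]
      · rintro (h' | h' | h')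
        exacts [Or.inl h', Or.inr (Or.inr h'), Or.inr (Or.inl h')]
  · -- member lists describe the classes
    intro r l hrl
    by_cases hr1 : r = s1
    · rw [hr1, get?_erase_self] at hrl
      cases hrl
    · rw [get?_erase_of_ne _ _ _ hr1, PySem.Dict.get?_insert] at hrl
      by_cases hr2 : r = s2
      · subst r
        rw [if_pos rfl, hd1, hd2] at hrl
        obtain rfl := Option.some.inj hrl
        refine ⟨hCs2, ?_⟩
        intro x
        rw [List.mem_append, class1 x, class2 x, hC]
        constructor
        · rintro (hx | hx)
          · rw [if_neg (fun h' => hs12 (Option.some.inj (hx ▸ h')).symm)]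
            exact hx
          · rw [if_pos hx]
        · intro hx
          by_cases hcond : comp.get? x = some s1
          · exact Or.inr hcond
          · rw [if_neg hcond] at hx
            exact Or.inl hx
      · rw [if_neg hr2] at hrl
        obtain ⟨hroot, hcls⟩ := h5 _ _ hrl
        refine ⟨?_, ?_⟩
        · rw [hC, if_neg (fun h' => hr1 (Option.some.inj (hroot ▸ h')))]
          exact hroot
        · intro x
          rw [hcls x, hC]
          constructor
          · intro hx
            rw [if_neg (fun h' => hr1 (Option.some.inj (hx ▸ h')))]
            exact hx
          · intro hx
            by_cases hcond : comp.get? x = some s1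
            · rw [if_pos hcond] at hx
              exact absurd (Option.some.inj hx).symm hr2
            · rw [if_neg hcond] at hx
              exact hx
  · -- every root has a member list
    intro r hr
    by_cases hr2 : r = s2
    · subst r
      rw [get?_erase_of_ne _ _ _ hs21, PySem.Dict.get?_insert, if_pos rfl]
      rfl
    · rw [hC] at hr
      by_cases hcond : comp.get? r = some s1
      · rw [if_pos hcond] at hr
        exact absurd (Option.some.inj hr).symm hr2
      · rw [if_neg hcond] at hr
        have hr1 : r ≠ s1 := fun e => hcond (by rw [hr]; exact congrArg some e)
        rw [get?_erase_of_ne _ _ _ hr1, PySem.Dict.get?_insert, if_neg hr2]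
        exact h6 _ hr
  · -- sums describe the class sums
    intro r s hrs
    by_cases hr1 : r = s1
    · rw [hr1, get?_erase_self] at hrs
      cases hrs
    · rw [get?_erase_of_ne _ _ _ hr1, PySem.Dict.get?_insert] at hrs
      by_cases hr2 : r = s2
      · subst r
        rw [if_pos rfl, hsd1, hsd2] at hrs
        obtain rfl := Option.some.inj hrs
        refine ⟨hCs2, ?_⟩
        have hpred : ∀ x, (((members.getD s1 []).foldl
            (fun d q => d.insert q s2) comp).get? x = some s2) ↔
            (comp.get? x = some s2 ∨ comp.get? x = some s1) := by
          intro x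
          rw [hC]
          by_cases hcond : comp.get? x = some s1
          · simp [hcond]
          · simp [hcond]
        rw [compSum_congr hpred, compSum_disjoint_union
          (fun x hx => hs12 (Option.some.inj (hx.2.symm.trans hx.1)))]
        rw [← hσ1eq, ← hσ2eq]
      · rw [if_neg hr2] at hrs
        obtain ⟨hroot, hsum⟩ := h7 _ _ hrs
        refine ⟨?_, ?_⟩
        · rw [hC, if_neg (fun h' => hr1 (Option.some.inj (hroot ▸ h')))]
          exact hroot
        · rw [hsum]
          apply compSum_congr
          intro x
          rw [hC]
          constructor
          · intro hx
            rw [if_neg (fun h' => hr1 (Option.some.inj (hx ▸ h')))]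
            exact hx
          · intro hx
            by_cases hcond : comp.get? x = some s1
            · rw [if_pos hcond] at hx
              exact absurd (Option.some.inj hx).symm hr2
            · rw [if_neg hcond] at hx
              exact hx
  · -- every root has a sum
    intro r hr
    by_cases hr2 : r = s2
    · subst r
      rw [get?_erase_of_ne _ _ _ hs21, PySem.Dict.get?_insert, if_pos rfl]
      rfl
    · rw [hC] at hr
      by_cases hcond : comp.get? r = some s1
      · rw [if_pos hcond] at hr
        exact absurd (Option.some.inj hr).symm hr2
      · rw [if_neg hcond] at hr
        have hr1 : r ≠ s1 := fun e => hcond (by rw [hr]; exact congrArg some e)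
        rw [get?_erase_of_ne _ _ _ hr1, PySem.Dict.get?_insert, if_neg hr2]
        exact h8 _ hr
  · -- edge support
    intro e he
    rcases List.mem_append.mp he with h' | h'
    · exact h9 e h'
    · rw [List.mem_singleton.mp h']
      exact ⟨hVsome hgc, hVsome hgp⟩

lemma mergeAt_inv {grid : List (List Int)} {n m : Int} {V : Int × Int → Prop}
    {E : List ((Int × Int) × (Int × Int))} {st : BState} {c p : Int × Int}
    (h : BInv grid n m V E st) (hc : V c) (hp : V p) :
    BInv grid n m V (E ++ [(c, p)]) (mergeAt c st p) := by
  obtain ⟨h1, h2, h3, h4, h5, h6, h7, h8, h9⟩ := id h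
  have hcont : st.1.contains p = true := by
    rw [PySem.Dict.contains_eq_isSome_get?]
    exact (h2 p).mpr hp
  obtain ⟨rc, hgc⟩ := Option.isSome_iff_exists.mp ((h2 c).mpr hc)
  obtain ⟨rp, hgp⟩ := Option.isSome_iff_exists.mp ((h2 p).mpr hp)
  have hdc : st.1.getD c c = rc := by rw [PySem.Dict.getD_eq_get?_getD, hgc]; rfl
  have hdp : st.1.getD p p = rp := by rw [PySem.Dict.getD_eq_get?_getD, hgp]; rfl
  unfold mergeAt
  rw [if_pos hcont]
  simp only [hdc, hdp]
  by_cases hrr : rc = rp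
  · rw [if_neg (not_not_intro hrr)]
    have hcp : EConn E c p := (h4 c p rc rp hgc hgp).mp hrr
    refine ⟨h1, h2, h3, ?_, h5, h6, h7, h8, ?_⟩
    · intro a b ra rb ha hb
      rw [h4 a b ra rb ha hb, econn_append_single]
      constructor
      · exact Or.inl
      · rintro (h' | ⟨ha', hb'⟩ | ⟨ha', hb'⟩)
        · exact h'
        · exact Relation.ReflTransGen.trans (Relation.ReflTransGen.trans ha' hcp) hb'
        · exact Relation.ReflTransGen.trans (Relation.ReflTransGen.trans ha' (econn_symm hcp)) hb'
    · intro e he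
      rcases List.mem_append.mp he with h' | h'
      · exact h9 e h'
      · rw [List.mem_singleton.mp h']
        exact ⟨hc, hp⟩
  · rw [if_pos hrr]
    by_cases hlen : (st.2.1.getD rc []).length > (st.2.1.getD rp []).length
    · rw [if_pos hlen]
      exact merge_core h hgc hgp hrr (Or.inr ⟨rfl, rfl⟩)
    · rw [if_neg hlen]
      exact merge_core h hgc hgp hrr (Or.inl ⟨rfl, rfl⟩)

lemma mergeAt_skip {grid : List (List Int)} {n m : Int} {V : Int × Int → Prop}
    {E : List ((Int × Int) × (Int × Int))} {st : BState} {c p : Int × Int}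
    (h : BInv grid n m V E st) (hp : ¬ V p) : mergeAt c st p = st := by
  obtain ⟨_, h2, _⟩ := h
  have : st.1.contains p = false := by
    rw [PySem.Dict.contains_eq_isSome_get?]
    rcases hcase : (st.1.get? p).isSome with _ | _
    · rfl
    · exact absurd ((h2 p).mp hcase) hp
  unfold mergeAt
  rw [this]
  rfl

lemma b_prev_fold {grid : List (List Int)} {n m : Int} {V : Int × Int → Prop} {c : Int × Int}
    (hc : V c) :
    ∀ (ps : List (Int × Int)) (E : List ((Int × Int) × (Int × Int))) (st : BState),
      BInv grid n m V E st → (∀ p ∈ ps, V p ↔ okb grid n m p = true) →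
      BInv grid n m V (E ++ (ps.filter (okb grid n m)).map (fun p => (c, p)))
        (ps.foldl (mergeAt c) st) := by
  intro ps
  induction ps with
  | nil => intro E st h _; simpa using h
  | cons p ps ih =>
    intro E st h hcond
    by_cases hok : okb grid n m p = true
    · have hVp : V p := (hcond p List.mem_cons_self).mpr hok
      have h' := mergeAt_inv h hc hVp
      have := ih (E ++ [(c, p)]) (mergeAt c st p) h'
        (fun q hq => hcond q (List.mem_cons_of_mem _ hq))
      rw [List.filter_cons_of_pos hok]
      simpa [List.append_assoc] using this
    · have hVp : ¬ V p := fun hv => hok ((hcond p List.mem_cons_self).mp hv)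
      rw [List.filter_cons_of_neg hok]
      rw [List.foldl_cons, mergeAt_skip h hVp]
      exact ih E st h (fun q hq => hcond q (List.mem_cons_of_mem _ hq))

lemma b_cell_step {grid : List (List Int)} {n m : Int} {pre rest : List (Int × Int)}
    {c : Int × Int} (hsplit : pre ++ c :: rest = allCells n m) (st : BState)
    (h : BInv grid n m (KeyOf grid n m pre) (edgesOf grid n m pre) st) :
    BInv grid n m (KeyOf grid n m (pre ++ [c])) (edgesOf grid n m (pre ++ [c]))
      (bCell grid st c.1 c.2) := by
  have hnd : (pre ++ c :: rest).Nodup := by rw [hsplit]; exact allCells_nodup n m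
  have hcpre : c ∉ pre := by
    have hd := (List.nodup_append.mp hnd).2.2
    exact fun hmem => hd c hmem c List.mem_cons_self rfl
  have hpw : (pre ++ c :: rest).Pairwise rmlt := by rw [hsplit]; exact allCells_pairwise n m
  have hprev : ∀ p, p ∈ prevNbrs c → okb grid n m p = true → p ∈ pre := by
    intro p hpn hok
    have hmem : p ∈ pre ++ c :: rest := by rw [hsplit]; exact okb_mem_allCells hok
    have hlt : rmlt p c := prevNbrs_rmlt hpn
    rcases List.mem_append.mp hmem with h' | h'
    · exact h'
    · rcases List.mem_cons.mp h' with rfl | h''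
      · exfalso; rcases hlt with h' | ⟨h1, h2⟩ <;> omega
      · exfalso
        have hcb : rmlt c p :=
          (List.pairwise_cons.mp (List.pairwise_append.mp hpw).2.1).1 p h''
        rcases hlt with h' | ⟨h1, h2⟩ <;> rcases hcb with h'' | ⟨h3, h4⟩ <;> omega
  show BInv grid n m (KeyOf grid n m (pre ++ [c])) (edgesOf grid n m (pre ++ [c]))
    (bCell grid st c.1 c.2)
  unfold bCell
  by_cases hg : gAt grid c.1 c.2 = 0
  · rw [if_neg (not_not_intro hg)]
    have hnok : okb grid n m c = false := by simp [okb, hg]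
    have hEeq : edgesOf grid n m (pre ++ [c]) = edgesOf grid n m pre := by
      unfold edgesOf
      rw [List.filter_append]
      simp [hnok]
    rw [hEeq]
    refine binv_congr ?_ h
    intro x
    constructor
    · rintro ⟨ho, hm⟩; exact ⟨ho, List.mem_append.mpr (Or.inl hm)⟩
    · rintro ⟨ho, hm⟩
      rcases List.mem_append.mp hm with h' | h'
      · exact ⟨ho, h'⟩
      · rw [List.mem_singleton.mp h'] at ho
        rw [ho] at hnok
        cases hnok
  · rw [if_pos hg]
    have hokc : okb grid n m c = true := by
      have hcm : c ∈ pre ++ c :: rest := List.mem_append.mpr (Or.inr List.mem_cons_self)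
      rw [hsplit] at hcm
      obtain ⟨⟨b1, b2⟩, b3, b4⟩ := mem_allCells.mp hcm
      simp [okb, b1, b2, b3, b4, hg]
    have hcm := okb_mem_allCells hokc
    have hstep1 := binv_add_vertex h (fun hv => hcpre hv.2) hcm
    have hstep2 := b_prev_fold (V := fun x => KeyOf grid n m pre x ∨ x = c)
      (Or.inr rfl) (prevNbrs c) (edgesOf grid n m pre) _ hstep1 ?_
    · have hE : edgesOf grid n m (pre ++ [c]) =
          edgesOf grid n m pre ++ ((prevNbrs c).filter (okb grid n m)).map (fun p => (c, p)) := by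
        unfold edgesOf
        rw [List.filter_append, List.flatMap_append]
        simp [hokc]
      rw [hE]
      refine binv_congr ?_ hstep2
      intro x
      constructor
      · rintro (⟨ho, hm⟩ | rfl)
        · exact ⟨ho, List.mem_append.mpr (Or.inl hm)⟩
        · exact ⟨hokc, List.mem_append.mpr (Or.inr (List.mem_singleton_self _))⟩
      · rintro ⟨ho, hm⟩
        rcases List.mem_append.mp hm with h' | h'
        · exact Or.inl ⟨ho, h'⟩
        · exact Or.inr (List.mem_singleton.mp h')
    · intro p hp
      constructor
      · rintro (⟨ho, _⟩ | rfl)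
        · exact ho
        · exfalso
          rcases prevNbrs_rmlt hp with h' | ⟨h1, h2⟩ <;> omega
      · intro hok
        exact Or.inl ⟨hok, hprev p hp hok⟩

lemma b_fold_inv {grid : List (List Int)} {n m : Int} :
    ∀ (suf pre : List (Int × Int)), pre ++ suf = allCells n m →
      ∀ st, BInv grid n m (KeyOf grid n m pre) (edgesOf grid n m pre) st →
        BInv grid n m (KeyOf grid n m (allCells n m)) (edgesOf grid n m (allCells n m))
          (suf.foldl (fun st c => bCell grid st c.1 c.2) st) := by
  intro suf
  induction suf with
  | nil => intro pre hsplit st h; rw [List.append_nil] at hsplit; subst hsplit; simpa using h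
  | cons c rest ih =>
    intro pre hsplit st h
    have h' := b_cell_step hsplit st h
    have := ih (pre ++ [c]) (by simpa using hsplit) (bCell grid st c.1 c.2) h'
    simpa using this

lemma solve_alt_as_fold (grid : List (List Int)) (n m : Int) :
    solve_alt grid n m =
      (((allCells n m).foldl (fun st c => bCell grid st c.1 c.2)
          (PySem.Dict.empty, PySem.Dict.empty, PySem.Dict.empty) : BState)).2.2.values.foldl
        (fun best v => if v > best then v else best) 0 := by
  unfold solve_alt allCells
  rw [List.foldl_flatMap]
  simp only [List.foldl_map]

lemma mem_edgesOf {grid : List (List Int)} {n m : Int} {P : List (Int × Int)}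
    {e : (Int × Int) × (Int × Int)} :
    e ∈ edgesOf grid n m P ↔
      e.1 ∈ P ∧ okb grid n m e.1 = true ∧ e.2 ∈ prevNbrs e.1 ∧ okb grid n m e.2 = true := by
  unfold edgesOf
  simp only [List.mem_flatMap, List.mem_filter, List.mem_map]
  constructor
  · rintro ⟨a, ⟨haP, haok⟩, p, ⟨hpn, hpok⟩, rfl⟩
    exact ⟨haP, haok, hpn, hpok⟩
  · rintro ⟨h1, h2, h3, h4⟩
    exact ⟨e.1, ⟨h1, h2⟩, e.2, ⟨h3, h4⟩, rfl⟩

lemma econn_iff_conn {grid : List (List Int)} {n m : Int} {a b : Int × Int} :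
    EConn (edgesOf grid n m (allCells n m)) a b ↔ Conn (KA grid n m) a b := by
  constructor
  · refine Relation.ReflTransGen.mono ?_
    intro x y hxy
    rcases hxy with h' | h'
    · obtain ⟨_, h2, h3, h4⟩ := mem_edgesOf.mp h'
      exact ⟨prevNbrs_mem_nbrs h3, h2, h4⟩
    · obtain ⟨_, h2, h3, h4⟩ := mem_edgesOf.mp h'
      exact ⟨mem_nbrs_symm.mp (prevNbrs_mem_nbrs h3), h4, h2⟩
  · refine Relation.ReflTransGen.mono ?_
    rintro x y ⟨hn, hx, hy⟩
    simp only [nbrs, List.mem_cons, List.not_mem_nil, or_false] at hn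
    rcases hn with rfl | rfl | rfl | rfl
    · refine Or.inr (mem_edgesOf.mpr ⟨okb_mem_allCells hy, hy, ?_, hx⟩)
      exact List.mem_cons.mpr (Or.inl (Prod.ext_iff.mpr ⟨by show x.1 = x.1 + 1 - 1; omega, rfl⟩))
    · refine Or.inl (mem_edgesOf.mpr ⟨okb_mem_allCells hx, hx, ?_, hy⟩)
      exact List.mem_cons.mpr (Or.inl rfl)
    · refine Or.inr (mem_edgesOf.mpr ⟨okb_mem_allCells hy, hy, ?_, hx⟩)
      refine List.mem_cons.mpr (Or.inr (List.mem_cons.mpr (Or.inl ?_)))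
      exact Prod.ext_iff.mpr ⟨rfl, by show x.2 = x.2 + 1 - 1; omega⟩
    · refine Or.inl (mem_edgesOf.mpr ⟨okb_mem_allCells hx, hx, ?_, hy⟩)
      exact List.mem_cons.mpr (Or.inr (List.mem_cons.mpr (Or.inl rfl)))

lemma final_values {grid : List (List Int)} {n m : Int} {st : BState}
    (h : BInv grid n m (KeyOf grid n m (allCells n m)) (edgesOf grid n m (allCells n m)) st) :
    ∀ v, v ∈ st.2.2.values ↔ ∃ cc, okb grid n m cc = true ∧ cval grid n m cc = v := by
  obtain ⟨h1, h2, h3, h4, h5, h6, h7, h8, h9⟩ := h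
  have hclass : ∀ r, st.1.get? r = some r →
      ∀ x, (st.1.get? x = some r) ↔ Conn (KA grid n m) r x := by
    intro r hr x
    have hokr : okb grid n m r = true := ((h2 r).mp (by rw [hr]; rfl)).1
    constructor
    · intro hx
      exact conn_symm (econn_iff_conn.mp ((h4 x r r r hx hr).mp rfl))
    · intro hcx
      have hokx : okb grid n m x = true := by
        rcases conn_k_right hcx with rfl | h'
        · exact hokr
        · exact h'
      obtain ⟨rx, hrx⟩ := Option.isSome_iff_exists.mp
        ((h2 x).mpr ⟨hokx, okb_mem_allCells hokx⟩)
      have : rx = r := (h4 x r rx r hrx hr).mpr (econn_iff_conn.mpr (conn_symm hcx))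
      rw [this] at hrx
      exact hrx
  intro v
  constructor
  · intro hv
    obtain ⟨⟨k, w⟩, hpmem, hp2⟩ := List.mem_map.mp hv
    have hget : st.2.2.get? k = some w :=
      PySem.Dict.get?_of_mem_items _ hpmem h1
    obtain ⟨hroot, hsum⟩ := h7 _ _ hget
    have hokr : okb grid n m k = true := ((h2 k).mp (by rw [hroot]; rfl)).1
    refine ⟨k, hokr, ?_⟩
    rw [← hp2, hsum]
    exact (compSum_congr (hclass _ hroot)).symm
  · rintro ⟨cc, hok, rfl⟩
    obtain ⟨r, hr⟩ := Option.isSome_iff_exists.mp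
      ((h2 cc).mpr ⟨hok, okb_mem_allCells hok⟩)
    have hroot := h3 _ _ hr
    obtain ⟨s, hs⟩ := Option.isSome_iff_exists.mp (h8 _ hroot)
    obtain ⟨_, hsum⟩ := h7 _ _ hs
    have hconn_cr : Conn (KA grid n m) cc r := econn_iff_conn.mp ((h4 cc r r r hr hroot).mp rfl)
    have hveq : cval grid n m cc = s := by
      rw [cval_eq_of_conn hconn_cr, hsum]
      exact (compSum_congr (hclass _ hroot)).symm
    rw [hveq]
    exact List.mem_map.mpr ⟨(r, s), PySem.Dict.mem_items_of_get?_eq_some _ hs, rfl⟩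

-- ===== VERDICT (by name: the statement is the Claim_ definition above) =====
theorem solve_spec : Claim_equal_solve := by
  intro grid n m _ _
  unfold Spec_solve
  have hB0 : BInv grid n m (KeyOf grid n m []) (edgesOf grid n m [])
      ((PySem.Dict.empty, PySem.Dict.empty, PySem.Dict.empty) : BState) := by
    refine ⟨?_, ?_, ?_, ?_, ?_, ?_, ?_, ?_, ?_⟩
    · exact PySem.Dict.nodup_keys_empty
    · intro a
      simp [PySem.Dict.get?_empty, KeyOf]
    · intro a r h'; rw [PySem.Dict.get?_empty] at h'; cases h'
    · intro a b ra rb h'; rw [PySem.Dict.get?_empty] at h'; cases h'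
    · intro r l h'; rw [PySem.Dict.get?_empty] at h'; cases h'
    · intro r h'; rw [PySem.Dict.get?_empty] at h'; cases h'
    · intro r s h'; rw [PySem.Dict.get?_empty] at h'; cases h'
    · intro r h'; rw [PySem.Dict.get?_empty] at h'; cases h'
    · intro e he; exact absurd he (List.not_mem_nil)
  have hBfin := b_fold_inv (allCells n m) [] rfl _ hB0
  have hA0 : AInv grid n m [] ((0 : Int), PySem.Set.empty) := by
    refine ⟨le_refl 0, ?_, Or.inl rfl, ?_⟩
    · intro c _ hc; exact absurd hc (List.not_mem_nil)
    · intro x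
      simp [PySem.Set.empty]
  have hAfin := a_fold_inv grid n m (allCells n m) [] (fun c hc => hc) _ hA0
  rw [List.nil_append] at hAfin
  obtain ⟨hA1, hA2, hA3, _⟩ := hAfin
  have hvals := final_values hBfin
  rw [solve_as_fold, solve_alt_as_fold]
  have hmax : ∀ (l : List Int) (b : Int),
      l.foldl (fun best v => if v > best then v else best) b = l.foldl max b := by
    intro l b
    refine PySem.List.foldl_congr_mem _ _ _ _ ?_
    intro acc x _
    rcases le_or_gt x acc with h' | h'
    · rw [if_neg (not_lt.mpr h'), max_eq_left h']
    · rw [if_pos h', max_eq_right h'.le]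
  rw [hmax]
  have hRle := PySem.List.le_foldl_max
    (((allCells n m).foldl (fun st c => bCell grid st c.1 c.2)
      (PySem.Dict.empty, PySem.Dict.empty, PySem.Dict.empty) : BState)).2.2.values (0 : Int)
  have hRmem := PySem.List.foldl_max_mem
    (((allCells n m).foldl (fun st c => bCell grid st c.1 c.2)
      (PySem.Dict.empty, PySem.Dict.empty, PySem.Dict.empty) : BState)).2.2.values (0 : Int)
  apply le_antisymm
  · rcases hA3 with h0 | ⟨cc, hok, _, hval⟩
    · rw [h0]; exact hRle.1
    · rw [hval]
      exact hRle.2 _ ((hvals _).mpr ⟨cc, hok, rfl⟩)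
  · rcases hRmem with h0 | hmem
    · rw [h0]; exact hA1
    · obtain ⟨cc, hok, hval⟩ := (hvals _).mp hmem
      rw [← hval]
      exact hA2 cc hok (okb_mem_allCells hok)
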